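-- pv_equiv track=rewrite | github.com/jsheng0901/leetcode | Hash Table/2842.py | countKSubsequencesWithMaxBeauty
-- ===== SOURCE A (Python) =====
-- from collections import Counter
-- from math import comb
--
-- def countKSubsequencesWithMaxBeauty(s: str, k: int) -> int:
--     """
--     Time O(n)
--     Space O(n)
--     此题贪心思路 + 数学思路，我们需要的是计算最大的k长度的子序列的乘积，那么我们可以先把frequency算出来，然后一个一个放进子序列，
--     直到放满k个为止，并且我们需要知道有多少个这个子序列，只需要一直累乘unique字符出现的frequency就行。
--     注意要一直除以mod，不然很容易超memory。
--     """
--     # 定义mod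
--     mod = 10 ** 9 + 7
--     # 计算出每个字符出现的频率
--     chr_to_freq = Counter(s)
--     # 如果unique字符的个数小于k说明我们构不成合理的子序列，返回0
--     if len(chr_to_freq) < k:
--         return 0
--     # 计算出每个频率出现的次数，这个才是我们需要放进结果的字符的顺序，次数多的先放，保证最后乘积最大
--     freq_to_chr = Counter(chr_to_freq.values())
--
--     res = 1
--     # 遍历频率到次数的字典，这里需要sort一下写
--     for key, val in dict(sorted(freq_to_chr.items(), reverse=True)).items():
--         # 如果我们有的次数少于等于k，说明还需要继续添加字符，此频率下的字符先全部加进去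
--         if val <= k:
--             # 结果是组合的效果，所以是累乘
--             res = res * ((pow(key, val, mod)) % mod)
--             # 更新剩下的k
--             k -= val
--         else:
--             # 此时我们需要的k小于我们有的次数，说明要从次数里面选出k个，然后再乘以次数
--             res = (res * comb(val, k) * pow(key, k, mod)) % mod
--             # 可更新可不更新，因为走到这里一定所有k都已经用完了
--             k -= val
--             # 用完所有k，结束循环
--             break
--
--     # 记得最终结果也要除以mod
--     return res % mod
-- ===== SOURCE B (Python) =====
-- from collections import Counter
-- from math import comb
--
-- def countKSubsequencesWithMaxBeauty(s: str, k: int) -> int: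
--     mod = 10 ** 9 + 7
--     # frequencies of the distinct characters, largest first
--     freqs = sorted(Counter(s).values(), reverse=True)
--     if len(freqs) < k:
--         return 0
--     if k == 0:
--         return 1
--     # cutoff frequency: the k-th largest frequency
--     threshold = freqs[k - 1]
--     # characters strictly above the cutoff are all taken
--     above = sum(1 for f in freqs if f > threshold)
--     # the remaining r slots are chosen among the m characters at the cutoff
--     r = k - above
--     res = 1
--     for f in freqs[:above]:
--         res = res * f % mod
--     res = res * comb(freqs.count(threshold), r) % mod
--     res = res * pow(threshold, r, mod) % mod
--     return res
-- ===== Notes on version B (the rewrite author's own statement) =====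
-- stated objective: alternative
-- what changed: B drops A's second Counter over grouped frequency tiers and its running-k loop with a break; instead it reads the cutoff frequency freqs[k-1] directly off the flat descending-sorted frequency list, multiplies the frequencies strictly above the cutoff, and finishes with a single comb/pow at the cutoff.
-- outside the precondition, e.g. on countKSubsequencesWithMaxBeauty('', -1): A returns 1, B raises IndexError
import Mathlib
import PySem

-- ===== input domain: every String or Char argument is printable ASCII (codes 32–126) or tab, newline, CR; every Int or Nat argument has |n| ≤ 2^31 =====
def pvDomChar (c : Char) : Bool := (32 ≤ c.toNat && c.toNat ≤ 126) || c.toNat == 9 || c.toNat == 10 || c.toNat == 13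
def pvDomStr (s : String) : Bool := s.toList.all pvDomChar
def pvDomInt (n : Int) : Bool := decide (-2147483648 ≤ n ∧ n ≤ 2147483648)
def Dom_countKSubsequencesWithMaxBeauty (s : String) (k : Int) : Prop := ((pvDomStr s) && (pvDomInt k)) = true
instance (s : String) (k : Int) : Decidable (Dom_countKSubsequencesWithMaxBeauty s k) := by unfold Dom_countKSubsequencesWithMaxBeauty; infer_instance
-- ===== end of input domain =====

-- B computes the selection cutoff freqs[k-1] directly on the flat sorted frequency list
-- (one comb/pow at the cutoff) instead of A's loop over grouped frequency tiers; return values only.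
-- Pre_ excludes negative k: there A raises ValueError (math.comb) whenever s is nonempty, and the 1 it
-- returns for an empty s with negative k is an accident of its empty loop.


-- ===== PORT A =====
-- A's for-loop over the descending (frequency, multiplicity) tiers; the 'break' arm returns directly.
-- pow(key, val, mod) is PySem.Int.powMod; math.comb(n, r) is Nat.choose on .toNat (exact: under Pre_ both
-- arguments are nonnegative everywhere this is reached).
def pvLoopA (md : Int) : List (Int × Int) → Int → Int → Int
  | [], _, res => res
  | (key, val) :: rest, k, res =>
    if val ≤ k then
      pvLoopA md rest (k - val) (res * (PySem.Int.mod (PySem.Int.powMod key val.toNat md) md))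
    else
      PySem.Int.mod (res * (val.toNat.choose k.toNat : Int) * PySem.Int.powMod key k.toNat md) md

def countKSubsequencesWithMaxBeauty (s : String) (k : Int) : Int :=
  let md : Int := 10 ^ 9 + 7
  let chrToFreq := PySem.Dict.counter s.toList
  if (chrToFreq.size : Int) < k then 0
  else
    let freqToChr := PySem.Dict.counter chrToFreq.values
    -- dict(sorted(items, reverse=True)).items(): the keys are distinct, so this is the sorted pair list itself
    let tiers := PySem.List.sorted2 freqToChr.items (fun p => p.1) (fun p => p.2) true
    PySem.Int.mod (pvLoopA md tiers k 1) md

-- ===== PORT B =====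
def countKSubsequencesWithMaxBeauty_alt (s : String) (k : Int) : Int :=
  let md : Int := 10 ^ 9 + 7
  let freqs := PySem.List.sorted (PySem.Dict.counter s.toList).values (fun x => x) true
  if (freqs.length : Int) < k then 0
  else if k = 0 then 1
  else
    -- freqs[k-1]: always in range here (1 ≤ k ≤ len(freqs))
    let threshold := PySem.List.pyGetD freqs (k - 1) 0
    let above : Int := (freqs.countP (fun f => decide (threshold < f)) : Nat)
    let r := k - above
    let res1 := (PySem.List.slice freqs none (some above)).foldl (fun res f => PySem.Int.mod (res * f) md) 1
    let res2 := PySem.Int.mod (res1 * ((freqs.count threshold).choose r.toNat : Int)) md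
    PySem.Int.mod (res2 * PySem.Int.powMod threshold r.toNat md) md

-- ===== PRECONDITION & SPEC =====
-- Pre_ excludes negative k: there A raises ValueError (math.comb) whenever s is nonempty, and the 1 it
-- returns for an empty s with negative k is an accident of its empty loop.
def Pre_countKSubsequencesWithMaxBeauty (s : String) (k : Int) : Prop := 0 ≤ k
instance (s : String) (k : Int) : Decidable (Pre_countKSubsequencesWithMaxBeauty s k) := by unfold Pre_countKSubsequencesWithMaxBeauty; infer_instance
def pvWitness_countKSubsequencesWithMaxBeauty : String × Int := ("aab", 1)

def Spec_countKSubsequencesWithMaxBeauty (s : String) (k : Int) (out : Int) : Prop := out = countKSubsequencesWithMaxBeauty_alt s k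
instance (s : String) (k : Int) (out : Int) : Decidable (Spec_countKSubsequencesWithMaxBeauty s k out) := by unfold Spec_countKSubsequencesWithMaxBeauty; infer_instance

-- ===== CLAIM (what is proved, stated in full; the proofs are below) =====
def Claim_equal_countKSubsequencesWithMaxBeauty : Prop := ∀ (s : String) (k : Int), Dom_countKSubsequencesWithMaxBeauty s k → Pre_countKSubsequencesWithMaxBeauty s k → Spec_countKSubsequencesWithMaxBeauty s k (countKSubsequencesWithMaxBeauty s k)

-- ===== LEMMAS AND PROOFS =====

def pvP : Int := 10 ^ 9 + 7

lemma pvP_pos : (0 : Int) < pvP := by norm_num [pvP]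

-- the exact product both programs reduce mod pvP: consume the tiers greedily
def pvProd : List (Int × Int) → Int → Int
  | [], _ => 1
  | (f, c) :: rest, k =>
      if c ≤ k then f ^ c.toNat * pvProd rest (k - c)
      else (c.toNat.choose k.toNat : Int) * f ^ k.toNat

-- the flat descending frequency list of a tier list
def pvFlat (L : List (Int × Int)) : List Int := L.flatMap (fun p => List.replicate p.2.toNat p.1)

-- B's threshold/above/comb computation, without the mod reductions
def pvCanon (xs : List Int) (k : Int) : Int :=
  let t := xs.getD (k - 1).toNat 0
  let a := xs.countP (fun x => decide (t < x))
  (xs.take a).prod * ((xs.count t).choose (k - (a : Int)).toNat : Int) * t ^ (k - (a : Int)).toNat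

-- mod helpers
lemma pvmm (b : Int) : b % pvP % pvP = b % pvP := Int.emod_emod_of_dvd b dvd_rfl

lemma pvmul_left (a b : Int) : (a % pvP) * b % pvP = a * b % pvP := by
  rw [Int.mul_emod, pvmm, ← Int.mul_emod]

lemma pvmul_right (a b : Int) : a * (b % pvP) % pvP = a * b % pvP := by
  rw [Int.mul_emod, pvmm, ← Int.mul_emod]

lemma pvmul_mid (a b d : Int) : a * (b % pvP) * d % pvP = a * b * d % pvP := by
  have h1 : a * (b % pvP) * d = (b % pvP) * (a * d) := by ring
  have h2 : a * b * d = b * (a * d) := by ring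
  rw [h1, h2, pvmul_left]

lemma pvmul_left3 (a b d : Int) : (a % pvP) * b * d % pvP = a * b * d % pvP := by
  have h1 : (a % pvP) * b * d = (a % pvP) * (b * d) := by ring
  have h2 : a * b * d = a * (b * d) := by ring
  rw [h1, h2, pvmul_left]

lemma pvLoopA_eq (L : List (Int × Int)) (k res : Int) :
    pvLoopA pvP L k res % pvP = res * pvProd L k % pvP := by
  induction L generalizing k res with
  | nil => simp [pvLoopA, pvProd]
  | cons p rest ih =>
    obtain ⟨f, c⟩ := p
    simp only [pvLoopA, pvProd, PySem.Int.powMod, PySem.Int.mod_eq_emod_of_pos pvP_pos]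
    split
    · rw [ih, pvmm, pvmul_mid, mul_assoc]
    · rw [pvmm, pvmul_right, mul_assoc]

lemma pvProd_zero (L : List (Int × Int)) (h : ∀ p ∈ L, 1 ≤ p.2) : pvProd L 0 = 1 := by
  cases L with
  | nil => rfl
  | cons p rest =>
    obtain ⟨f, c⟩ := p
    have : ¬ c ≤ 0 := by have := h (f, c) (by simp); simp at this ⊢; omega
    simp [pvProd, this]

lemma pvFoldMod (xs : List Int) (i : Int) :
    xs.foldl (fun r f => r * f % pvP) i % pvP = i * xs.prod % pvP := by
  induction xs generalizing i with
  | nil => simp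
  | cons x xs ih =>
    simp only [List.foldl_cons, List.prod_cons]
    rw [ih, pvmul_left, mul_assoc]

-- membership in the flattened tier list
lemma pvFlat_mem {L : List (Int × Int)} {x : Int} (h : x ∈ pvFlat L) : ∃ p ∈ L, x = p.1 := by
  simp only [pvFlat, List.mem_flatMap] at h
  obtain ⟨p, hp, hx⟩ := h
  exact ⟨p, hp, List.eq_of_mem_replicate hx⟩

lemma pvFlat_pairwise {L : List (Int × Int)} (h : L.Pairwise (fun a b => b.1 < a.1)) :
    (pvFlat L).Pairwise (fun a b => b ≤ a) := by
  induction L with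
  | nil => simp [pvFlat]
  | cons p rest ih =>
    rw [List.pairwise_cons] at h
    show (List.replicate p.2.toNat p.1 ++ pvFlat rest).Pairwise _
    rw [List.pairwise_append]
    refine ⟨?_, ih h.2, ?_⟩
    · exact List.pairwise_replicate.mpr (Or.inr le_rfl)
    · intro a ha b hb
      obtain ⟨q, hq, rfl⟩ := pvFlat_mem hb
      have := List.eq_of_mem_replicate ha
      subst this
      exact (h.1 q hq).le

-- the heart: B's cutoff computation on the flat list equals the greedy tier product
lemma pvCanon_flat (L : List (Int × Int)) (k : Int)
    (hd : L.Pairwise (fun a b => b.1 < a.1)) (hc : ∀ p ∈ L, 1 ≤ p.2)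
    (hk1 : 1 ≤ k) (hk2 : k ≤ (pvFlat L).length) :
    pvCanon (pvFlat L) k = pvProd L k := by
  induction L generalizing k with
  | nil => simp [pvFlat] at hk2; omega
  | cons p rest ih =>
    obtain ⟨f, c⟩ := p
    rw [List.pairwise_cons] at hd
    have hc1 : (1 : Int) ≤ c := hc (f, c) (by simp)
    have hcrest : ∀ p ∈ rest, 1 ≤ p.2 := fun p hp => hc p (List.mem_cons_of_mem _ hp)
    have hflat : pvFlat ((f, c) :: rest) = List.replicate c.toNat f ++ pvFlat rest := by
      simp [pvFlat]
    have hlt : ∀ x ∈ pvFlat rest, x < f := by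
      intro x hx; obtain ⟨q, hq, rfl⟩ := pvFlat_mem hx; exact hd.1 q hq
    have hcn : (c.toNat : Int) = c := Int.toNat_of_nonneg (by omega)
    rw [hflat] at hk2 ⊢
    rw [List.length_append, List.length_replicate] at hk2
    by_cases hck : k ≤ c
    · -- the cutoff lies in the first tier
      have hidx : (k - 1).toNat < c.toNat := by omega
      have ht : (List.replicate c.toNat f ++ pvFlat rest).getD (k - 1).toNat 0 = f := by
        rw [List.getD_eq_getElem _ _ (by rw [List.length_append, List.length_replicate]; omega)]
        rw [List.getElem_append_left (by simpa using hidx)]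
        simp
      have ha : (List.replicate c.toNat f ++ pvFlat rest).countP (fun x => decide (f < x)) = 0 := by
        rw [List.countP_append]
        have h1 : (List.replicate c.toNat f).countP (fun x => decide (f < x)) = 0 :=
          List.countP_eq_zero.mpr (fun a ha => by simp [List.eq_of_mem_replicate ha])
        have h2 : (pvFlat rest).countP (fun x => decide (f < x)) = 0 :=
          List.countP_eq_zero.mpr (fun a ha => by simpa using not_lt.mpr (hlt a ha).le)
        omega
      have hcount : (List.replicate c.toNat f ++ pvFlat rest).count f = c.toNat := by
        rw [List.count_append, List.count_replicate_self,
          List.count_eq_zero.mpr (fun hf => absurd (hlt f hf) (lt_irrefl f)), Nat.add_zero]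
      simp only [pvCanon, ht, ha]
      simp only [List.take_zero, List.prod_nil, one_mul, Nat.cast_zero, sub_zero, hcount]
      by_cases hkc : c ≤ k
      · have hkc' : k = c := le_antisymm hck hkc
        subst hkc'
        rw [pvProd, if_pos hkc, sub_self, pvProd_zero rest hcrest, mul_one, Nat.choose_self]
        simp
      · rw [pvProd, if_neg hkc]
    · -- the first tier is consumed whole; recurse
      rw [not_le] at hck
      have hk1' : (1 : Int) ≤ k - c := by omega
      have hk2' : k - c ≤ ((pvFlat rest).length : Int) := by
        push_cast at hk2 ⊢; omega
      have hidx : c.toNat ≤ (k - 1).toNat := by omega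
      have hidx2 : (k - 1).toNat - c.toNat = (k - c - 1).toNat := by omega
      have hidx3 : (k - c - 1).toNat < (pvFlat rest).length := by omega
      have ht : (List.replicate c.toNat f ++ pvFlat rest).getD (k - 1).toNat 0
          = (pvFlat rest).getD (k - c - 1).toNat 0 := by
        rw [List.getD_append_right _ _ _ _ (by simpa using hidx), List.length_replicate, hidx2]
      set t := (pvFlat rest).getD (k - c - 1).toNat 0 with hts
      have htmem : t ∈ pvFlat rest := by
        rw [hts, List.getD_eq_getElem _ _ hidx3]
        exact List.getElem_mem _
      have htf : t < f := hlt t htmem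
      have ha : (List.replicate c.toNat f ++ pvFlat rest).countP (fun x => decide (t < x))
          = c.toNat + (pvFlat rest).countP (fun x => decide (t < x)) := by
        rw [List.countP_append]
        congr 1
        rw [List.countP_eq_length.mpr (fun a ha => by simp [List.eq_of_mem_replicate ha, htf]),
          List.length_replicate]
      have hcount : (List.replicate c.toNat f ++ pvFlat rest).count t = (pvFlat rest).count t := by
        rw [List.count_append, List.count_replicate,
          if_neg (fun h : f == t => absurd ((eq_of_beq h) ▸ htf) (lt_irrefl t))]
        omega
      have haL : (pvFlat rest).countP (fun x => decide (t < x)) ≤ (pvFlat rest).length :=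
        List.countP_le_length
      have htake : (List.replicate c.toNat f ++ pvFlat rest).take
            (c.toNat + (pvFlat rest).countP (fun x => decide (t < x)))
          = List.replicate c.toNat f ++ (pvFlat rest).take ((pvFlat rest).countP (fun x => decide (t < x))) := by
        have := List.take_length_add_append (l₁ := List.replicate c.toNat f) (l₂ := pvFlat rest)
          ((pvFlat rest).countP (fun x => decide (t < x)))
        rw [List.length_replicate] at this
        exact this
      simp only [pvCanon, ht, ha, hcount, htake]
      rw [List.prod_append, List.prod_replicate]
      have hsub : (k - ((c.toNat + (pvFlat rest).countP (fun x => decide (t < x)) : Nat) : Int))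
          = (k - c) - (((pvFlat rest).countP (fun x => decide (t < x)) : Nat) : Int) := by
        push_cast; omega
      rw [hsub]
      have ihv := ih (k - c) hd.2 hcrest hk1' hk2'
      simp only [pvCanon] at ihv
      rw [pvProd, if_pos hck.le, ← ihv]
      ring

-- sorted2 with distinct primary keys is sorted by the primary key
def pvB2 (a b : Int × Int) : Bool := decide (b.1 < a.1) || (!decide (a.1 < b.1) && decide (b.2 < a.2))
def pvB1 (a b : Int × Int) : Bool := decide (b.1 < a.1)

lemma pvBefore_eq (x y : Int × Int) (h : x.1 ≠ y.1) : pvB2 x y = pvB1 x y := by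
  by_cases h1 : y.1 < x.1
  · simp [pvB2, pvB1, h1]
  · have h2 : x.1 < y.1 := lt_of_le_of_ne (not_lt.mp h1) h
    simp [pvB2, pvB1, h1, h2]

lemma pvInsertBy_congr (b1 b2 : (Int × Int) → (Int × Int) → Bool) (x : Int × Int)
    (ys : List (Int × Int)) (h : ∀ y ∈ ys, b1 x y = b2 x y) :
    PySem.List.insertBy b1 x ys = PySem.List.insertBy b2 x ys := by
  induction ys with
  | nil => rfl
  | cons y ys ih =>
    simp only [PySem.List.insertBy]
    rw [h y (List.mem_cons_self ..)]
    split
    · rfl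
    · rw [ih (fun z hz => h z (List.mem_cons_of_mem _ hz))]

lemma pvFold_congr (xs : List (Int × Int)) (acc : List (Int × Int))
    (hx : ∀ x ∈ xs, ∀ y ∈ acc, x.1 ≠ y.1)
    (hnd : (xs.map Prod.fst).Nodup) :
    xs.foldl (fun a x => PySem.List.insertBy pvB2 x a) acc
      = xs.foldl (fun a x => PySem.List.insertBy pvB1 x a) acc := by
  induction xs generalizing acc with
  | nil => rfl
  | cons x xs ih =>
    simp only [List.map_cons, List.nodup_cons] at hnd
    simp only [List.foldl_cons]
    rw [pvInsertBy_congr pvB2 pvB1 x acc (fun y hy => pvBefore_eq x y (hx x (by simp) y hy))]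
    apply ih
    · intro z hz y hy
      rcases (PySem.List.mem_insertBy pvB1 x y acc).mp hy with rfl | hy'
      · intro hzy
        exact hnd.1 (List.mem_map.mpr ⟨z, hz, hzy⟩)
      · exact hx z (List.mem_cons_of_mem _ hz) y hy'
    · exact hnd.2

lemma pvSorted2_eq_sorted (xs : List (Int × Int)) (hnd : (xs.map Prod.fst).Nodup) :
    PySem.List.sorted2 xs (fun p => p.1) (fun p => p.2) true = PySem.List.sorted xs (fun p => p.1) true :=
  pvFold_congr xs [] (by simp) hnd

lemma pvDedupFlat (S : List Int) (hS : S.Nodup) (c : Int → Nat) (x : Int) :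
    (S.flatMap (fun v => List.replicate (c v) v)).count x = if x ∈ S then c x else 0 := by
  induction S with
  | nil => simp
  | cons u us ih =>
    simp only [List.nodup_cons] at hS
    rw [List.flatMap_cons, List.count_append, ih hS.2, List.count_replicate]
    by_cases h : x = u
    · subst h
      simp [hS.1]
    · simp [h]
      intro hh
      exact absurd hh.symm h

-- ===== VERDICT (by name: the statement is the Claim_ definition above) =====
theorem countKSubsequencesWithMaxBeauty_spec : Claim_equal_countKSubsequencesWithMaxBeauty := by
  intro s k _ hpre
  unfold Pre_countKSubsequencesWithMaxBeauty at hpre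
  unfold Spec_countKSubsequencesWithMaxBeauty
  simp only [countKSubsequencesWithMaxBeauty, countKSubsequencesWithMaxBeauty_alt]
  set vals := (PySem.Dict.counter s.toList).values with hvals
  set items := (PySem.Dict.counter vals).items with hitemsdef
  set L := PySem.List.sorted2 items (fun p => p.1) (fun p => p.2) true with hLdef
  set freqs := PySem.List.sorted vals (fun x => x) true with hfreqsdef
  -- structural facts about the tier list L
  have hnd : (items.map Prod.fst).Nodup := by
    have := PySem.Dict.nodup_keys_counter vals
    simpa [PySem.Dict.keys] using this
  have hperm : L.Perm items := PySem.List.sorted2_perm items (fun p => p.1) (fun p => p.2) true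
  have hsorted : L = PySem.List.sorted items (fun p => p.1) true := pvSorted2_eq_sorted items hnd
  have hndL : (L.map Prod.fst).Nodup := ((hperm.map Prod.fst).nodup_iff).mpr hnd
  have hdesc : L.Pairwise (fun a b => b.1 < a.1) := by
    have h2 : L.Pairwise (fun a b => b.1 ≤ a.1) := by
      rw [hsorted]; exact PySem.List.sorted_pairwise_rev items (fun p => p.1)
    have h4 : L.Pairwise (fun a b => a.1 ≠ b.1) := List.pairwise_map.mp hndL
    exact (h2.and h4).imp (fun h => lt_of_le_of_ne h.1 (Ne.symm h.2))
  have hcnt : ∀ p ∈ L, 1 ≤ p.2 := by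
    intro p hp
    have hpi : p ∈ items := hperm.subset hp
    rw [hitemsdef, PySem.Dict.items_counter] at hpi
    obtain ⟨v, hv, rfl⟩ := List.mem_map.mp hpi
    have hvv : v ∈ vals := (PySem.Set.mem_ofList vals v).mp hv
    have := List.count_pos_iff.mpr hvv
    show (1 : Int) ≤ (List.count v vals : Int)
    exact_mod_cast this
  have hlenf : freqs.length = vals.length := PySem.List.length_sorted vals (fun x => x) true
  have hflat_perm : (pvFlat L).Perm vals := by
    have h1 : (pvFlat L).Perm (pvFlat items) :=
      List.Perm.flatMap hperm (fun a _ => List.Perm.refl _)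
    have h2 : pvFlat items = (PySem.Set.ofList vals).flatMap (fun v => List.replicate (vals.count v) v) := by
      rw [hitemsdef]
      unfold pvFlat
      rw [PySem.Dict.items_counter, List.flatMap_map]
      simp
    have h3 : ((PySem.Set.ofList vals).flatMap (fun v => List.replicate (vals.count v) v)).Perm vals := by
      rw [List.perm_iff_count]
      intro a
      rw [pvDedupFlat _ (PySem.Set.nodup_ofList vals)]
      by_cases ha : a ∈ vals
      · rw [if_pos ((PySem.Set.mem_ofList vals a).mpr ha)]
      · rw [if_neg (fun h => ha ((PySem.Set.mem_ofList vals a).mp h))]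
        exact (List.count_eq_zero.mpr ha).symm
    exact h1.trans (h2 ▸ h3)
  have hflat_eq : pvFlat L = freqs := by
    apply PySem.List.eq_of_perm_of_pairwise_le_of_injective (fun x : Int => -x) neg_injective
      (hflat_perm.trans (PySem.List.sorted_perm vals (fun x => x) true).symm)
    · exact (pvFlat_pairwise hdesc).imp (fun h => neg_le_neg h)
    · exact (PySem.List.sorted_pairwise_rev vals (fun x => x)).imp (fun h => neg_le_neg h)
  have hsize : ((PySem.Dict.counter s.toList).size : Int) = (vals.length : Int) := by
    simp [hvals, PySem.Dict.size, PySem.Dict.values]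
  rw [hsize]
  by_cases hbig : (vals.length : Int) < k
  · rw [if_pos hbig, if_pos (by rw [hlenf]; exact hbig)]
  · rw [if_neg hbig, if_neg (by rw [hlenf]; exact hbig)]
    rw [show (10 ^ 9 + 7 : Int) = pvP from rfl,
      PySem.Int.mod_eq_emod_of_pos pvP_pos, pvLoopA_eq, one_mul]
    by_cases hk0 : k = 0
    · subst hk0
      rw [if_pos rfl, pvProd_zero L hcnt]
      norm_num [pvP]
    · rw [if_neg hk0]
      have hk1 : (1 : Int) ≤ k := by omega
      have hkle : k ≤ ((pvFlat L).length : Int) := by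
        rw [hflat_eq, hlenf]; exact not_lt.mp hbig
      -- reduce B's expression to pvCanon freqs k % pvP
      have e1 : k - 1 = (((k - 1).toNat : Nat) : Int) := by omega
      rw [e1, PySem.List.pyGetD_natCast]
      set t := freqs.getD (k - 1).toNat 0 with htdef
      set a := freqs.countP (fun f => decide (t < f)) with hadef
      rw [PySem.List.slice_to freqs (Int.natCast_nonneg a)]
      rw [show ((a : Int)).toNat = a from Int.toNat_natCast a]
      simp only [PySem.Int.powMod, PySem.Int.mod_eq_emod_of_pos pvP_pos]
      rw [Int.mul_emod (List.foldl _ 1 _), pvFoldMod, one_mul, ← Int.mul_emod]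
      rw [pvmul_mid, pvmul_left3]
      have hcanon : (freqs.take a).prod * ((freqs.count t).choose (k - (a : Int)).toNat : Int)
          * t ^ (k - (a : Int)).toNat = pvCanon freqs k := by
        simp only [pvCanon, htdef, hadef]
      rw [hcanon, ← hflat_eq, pvCanon_flat L k hdesc hcnt hk1 hkle]
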